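-- pv_equiv track=rewrite | github.com/xcthomaswagner/agent-harness | services/l3_pr_review/main.py | _category_from_labels
-- ===== SOURCE A (Python) =====
-- def _category_from_labels(labels: list[str]) -> str:
--     """Map GitHub issue labels to defect_links.category."""
--     lower = {(label_name or "").lower() for label_name in labels}
--     if "pre-existing" in lower or "pre_existing" in lower:
--         return "pre_existing"
--     if "infra" in lower or "infrastructure" in lower:
--         return "infra"
--     if "feature-request" in lower or "feature_request" in lower or "enhancement" in lower:
--         return "feature_request"
--     return "escaped"
-- ===== SOURCE B (Python) =====
-- _PRIO = {
--     "pre-existing": 0, "pre_existing": 0,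
--     "infra": 1, "infrastructure": 1,
--     "feature-request": 2, "feature_request": 2, "enhancement": 2,
-- }
-- _NAMES = ["pre_existing", "infra", "feature_request", "escaped"]
--
-- def _category_from_labels(labels: list[str]) -> str:
--     """Map GitHub issue labels to defect_links.category (single-pass min-priority)."""
--     best = 3
--     for name in labels:
--         best = min(best, _PRIO.get((name or "").lower(), 3))
--     return _NAMES[best]
-- ===== Notes on version B (the rewrite author's own statement) =====
-- stated objective: alternative
-- what changed: Replaces the build-a-set-then-if-cascade with a single pass that maps each lowered label to a numeric priority via a keyword table and keeps the running minimum, indexing a name table at the end; no set is built and no membership cascade runs.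
import Mathlib
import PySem

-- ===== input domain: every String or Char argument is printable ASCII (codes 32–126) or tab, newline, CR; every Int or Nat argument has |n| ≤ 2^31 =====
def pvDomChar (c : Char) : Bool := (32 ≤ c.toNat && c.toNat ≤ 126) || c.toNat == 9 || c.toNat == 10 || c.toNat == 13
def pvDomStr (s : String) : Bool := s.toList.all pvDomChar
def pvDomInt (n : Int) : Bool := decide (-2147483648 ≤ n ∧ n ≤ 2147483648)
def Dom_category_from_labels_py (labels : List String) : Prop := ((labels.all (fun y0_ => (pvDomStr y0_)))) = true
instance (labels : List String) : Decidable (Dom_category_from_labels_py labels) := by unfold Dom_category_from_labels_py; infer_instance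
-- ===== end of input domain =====

-- B replaces A's build-a-set-then-if-cascade by a single pass keeping the minimum
-- priority of each lowered label under a keyword table (objective: alternative).


-- ===== PORT A =====
def category_from_labels_py (labels : List String) : String :=
  let lower : PySem.Set String :=
    PySem.Set.ofList (labels.map (fun label_name =>
      PySem.Str.lower (if label_name == "" then "" else label_name)))
  if PySem.Set.contains lower "pre-existing" || PySem.Set.contains lower "pre_existing" then
    "pre_existing"
  else if PySem.Set.contains lower "infra" || PySem.Set.contains lower "infrastructure" then
    "infra"
  else if PySem.Set.contains lower "feature-request" || PySem.Set.contains lower "feature_request"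
      || PySem.Set.contains lower "enhancement" then
    "feature_request"
  else
    "escaped"

-- ===== PORT B =====
-- the module-level dict _PRIO of Source B
def pvPrioTable : PySem.Dict String Nat :=
  PySem.Dict.ofList
    [("pre-existing", 0), ("pre_existing", 0),
     ("infra", 1), ("infrastructure", 1),
     ("feature-request", 2), ("feature_request", 2), ("enhancement", 2)]

-- the module-level list _NAMES of Source B
def pvNames : List String := ["pre_existing", "infra", "feature_request", "escaped"]

def category_from_labels_py_alt (labels : List String) : String :=
  let best : Nat := labels.foldl
    (fun b name =>
      min b (PySem.Dict.getD pvPrioTable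
        (PySem.Str.lower (if name == "" then "" else name)) 3)) 3
  pvNames.getD best ""

-- ===== PRECONDITION & SPEC =====
def Spec_category_from_labels_py (labels : List String) (out : String) : Prop := out = category_from_labels_py_alt labels
instance (labels : List String) (out : String) : Decidable (Spec_category_from_labels_py labels out) := by unfold Spec_category_from_labels_py; infer_instance

-- ===== CLAIM (what is proved, stated in full; the proofs are below) =====
def Claim_equal_category_from_labels_py : Prop := ∀ (labels : List String), Dom_category_from_labels_py labels → Spec_category_from_labels_py labels (category_from_labels_py labels)

-- ===== LEMMAS AND PROOFS =====

-- the lowered label and its table priority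
def pvLow (s : String) : String := PySem.Str.lower (if s == "" then "" else s)
def pvG (s : String) : Nat := PySem.Dict.getD pvPrioTable (pvLow s) 3
def pvM (labels : List String) : Nat := labels.foldl (fun b n => min b (pvG n)) 3

theorem pvPrioTable_eq : pvPrioTable = PySem.Dict.mk
    [("pre-existing", 0), ("pre_existing", 0),
     ("infra", 1), ("infrastructure", 1),
     ("feature-request", 2), ("feature_request", 2), ("enhancement", 2)] := by decide

theorem pvG_cases (s : String) :
    pvG s = 0  ∨  pvG s = 1  ∨  pvG s = 2  ∨  pvG s = 3 := by
  unfold pvG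
  rw [pvPrioTable_eq]
  generalize pvLow s = t
  simp only [PySem.Dict.getD_eq_get?_getD, PySem.Dict.get?_mk_cons]
  split_ifs <;> simp [PySem.Dict.get?]

theorem pvG_le (s : String) : pvG s ≤ 3 := by
  rcases pvG_cases s with h | h | h | h <;> omega

theorem pvG_eq_zero (s : String) :
    pvG s = 0 ↔ (pvLow s = "pre-existing"  ∨  pvLow s = "pre_existing") := by
  unfold pvG
  rw [pvPrioTable_eq]
  generalize pvLow s = t
  simp only [PySem.Dict.getD_eq_get?_getD, PySem.Dict.get?_mk_cons]
  split_ifs <;> simp only [beq_iff_eq] at * <;> (try subst t) <;>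
    first
      | decide
      | (constructor
         · intro h; simp [PySem.Dict.get?] at h
         · rintro (h | h) <;> subst h <;> simp_all)

theorem pvG_eq_one (s : String) :
    pvG s = 1 ↔ (pvLow s = "infra"  ∨  pvLow s = "infrastructure") := by
  unfold pvG
  rw [pvPrioTable_eq]
  generalize pvLow s = t
  simp only [PySem.Dict.getD_eq_get?_getD, PySem.Dict.get?_mk_cons]
  split_ifs <;> simp only [beq_iff_eq] at * <;> (try subst t) <;>
    first
      | decide
      | (constructor
         · intro h; simp [PySem.Dict.get?] at h
         · rintro (h | h) <;> subst h <;> simp_all)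

theorem pvG_eq_two (s : String) :
    pvG s = 2 ↔ (pvLow s = "feature-request"  ∨  pvLow s = "feature_request"  ∨  pvLow s = "enhancement") := by
  unfold pvG
  rw [pvPrioTable_eq]
  generalize pvLow s = t
  simp only [PySem.Dict.getD_eq_get?_getD, PySem.Dict.get?_mk_cons]
  split_ifs <;> simp only [beq_iff_eq] at * <;> (try subst t) <;>
    first
      | decide
      | (constructor
         · intro h; simp [PySem.Dict.get?] at h
         · rintro (h | h | h) <;> subst h <;> simp_all)

theorem foldl_min_init (xs : List String) : ∀ b : Nat, b ≤ 3 →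
    xs.foldl (fun a n => min a (pvG n)) b = min b (xs.foldl (fun a n => min a (pvG n)) 3) := by
  induction xs with
  | nil => intro b hb; simp; omega
  | cons x xs ih =>
    intro b hb
    have hx := pvG_le x
    simp only [List.foldl_cons]
    rw [ih (min b (pvG x)) (by omega), ih (min 3 (pvG x)) (by omega)]
    omega

theorem pvM_cons (x : String) (xs : List String) : pvM (x :: xs) = min (pvG x) (pvM xs) := by
  have hx := pvG_le x
  simp only [pvM, List.foldl_cons]
  rw [foldl_min_init xs (min 3 (pvG x)) (by omega)]
  omega

theorem pvM_le (xs : List String) : pvM xs ≤ 3 := by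
  induction xs with
  | nil => simp [pvM]
  | cons x xs ih => rw [pvM_cons]; omega

theorem pvM_le_iff (labels : List String) (i : Nat) (hi : i < 3) :
    pvM labels ≤ i ↔ ∃ s ∈ labels, pvG s ≤ i := by
  induction labels with
  | nil => simp [pvM]; omega
  | cons x xs ih => rw [pvM_cons]; simp [ih]

theorem altEq (labels : List String) :
    category_from_labels_py_alt labels = pvNames.getD (pvM labels) "" := rfl

theorem aEq (labels : List String) : category_from_labels_py labels =
    (if (labels.map pvLow).contains "pre-existing" || (labels.map pvLow).contains "pre_existing" then "pre_existing"
     else if (labels.map pvLow).contains "infra" || (labels.map pvLow).contains "infrastructure" then "infra"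
     else if (labels.map pvLow).contains "feature-request" || (labels.map pvLow).contains "feature_request"
         || (labels.map pvLow).contains "enhancement" then "feature_request"
     else "escaped") := by
  have hcont : ∀ k : String,
      PySem.Set.contains (PySem.Set.ofList (labels.map pvLow)) k = (labels.map pvLow).contains k := by
    intro k
    simp [PySem.Set.contains, PySem.Set.mem_ofList]
  simp only [category_from_labels_py]
  rw [show (fun label_name => PySem.Str.lower (if label_name == "" then "" else label_name)) = pvLow from rfl]
  simp only [hcont]

theorem pvH0 (labels : List String) : pvM labels ≤ 0 ↔
    ((∃ s ∈ labels, pvLow s = "pre-existing") ∨ (∃ s ∈ labels, pvLow s = "pre_existing")) := by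
  rw [pvM_le_iff labels 0 (by omega)]
  constructor
  · rintro ⟨s, hs, hg⟩
    rcases (pvG_eq_zero s).1 (by omega) with h | h
    · exact Or.inl ⟨s, hs, h⟩
    · exact Or.inr ⟨s, hs, h⟩
  · rintro (⟨s, hs, h⟩ | ⟨s, hs, h⟩)
    · exact ⟨s, hs, le_of_eq ((pvG_eq_zero s).2 (Or.inl h))⟩
    · exact ⟨s, hs, le_of_eq ((pvG_eq_zero s).2 (Or.inr h))⟩

theorem pvH1 (labels : List String) : pvM labels ≤ 1 ↔ (pvM labels ≤ 0 ∨
    ((∃ s ∈ labels, pvLow s = "infra") ∨ (∃ s ∈ labels, pvLow s = "infrastructure"))) := by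
  rw [pvM_le_iff labels 1 (by omega)]
  constructor
  · rintro ⟨s, hs, hg⟩
    by_cases h : pvG s ≤ 0
    · exact Or.inl ((pvM_le_iff labels 0 (by omega)).2 ⟨s, hs, h⟩)
    · rcases (pvG_eq_one s).1 (by omega) with h' | h'
      · exact Or.inr (Or.inl ⟨s, hs, h'⟩)
      · exact Or.inr (Or.inr ⟨s, hs, h'⟩)
  · rintro (h | ⟨s, hs, h⟩ | ⟨s, hs, h⟩)
    · obtain ⟨s, hs, hg⟩ := (pvM_le_iff labels 0 (by omega)).1 h
      exact ⟨s, hs, by omega⟩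
    · exact ⟨s, hs, le_of_eq ((pvG_eq_one s).2 (Or.inl h))⟩
    · exact ⟨s, hs, le_of_eq ((pvG_eq_one s).2 (Or.inr h))⟩

theorem pvH2 (labels : List String) : pvM labels ≤ 2 ↔ (pvM labels ≤ 1 ∨
    ((∃ s ∈ labels, pvLow s = "feature-request") ∨ (∃ s ∈ labels, pvLow s = "feature_request") ∨
     (∃ s ∈ labels, pvLow s = "enhancement"))) := by
  rw [pvM_le_iff labels 2 (by omega)]
  constructor
  · rintro ⟨s, hs, hg⟩
    by_cases h : pvG s ≤ 1
    · exact Or.inl ((pvM_le_iff labels 1 (by omega)).2 ⟨s, hs, h⟩)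
    · rcases (pvG_eq_two s).1 (by omega) with h' | h' | h'
      · exact Or.inr (Or.inl ⟨s, hs, h'⟩)
      · exact Or.inr (Or.inr (Or.inl ⟨s, hs, h'⟩))
      · exact Or.inr (Or.inr (Or.inr ⟨s, hs, h'⟩))
  · rintro (h | ⟨s, hs, h⟩ | ⟨s, hs, h⟩ | ⟨s, hs, h⟩)
    · obtain ⟨s, hs, hg⟩ := (pvM_le_iff labels 1 (by omega)).1 h
      exact ⟨s, hs, by omega⟩
    · exact ⟨s, hs, le_of_eq ((pvG_eq_two s).2 (Or.inl h))⟩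
    · exact ⟨s, hs, le_of_eq ((pvG_eq_two s).2 (Or.inr (Or.inl h)))⟩
    · exact ⟨s, hs, le_of_eq ((pvG_eq_two s).2 (Or.inr (Or.inr h)))⟩

-- ===== VERDICT (by name: the statement is the Claim_ definition above) =====
set_option maxHeartbeats 1000000 in
theorem category_from_labels_py_spec : Claim_equal_category_from_labels_py := by
  intro labels _
  unfold Spec_category_from_labels_py
  rw [aEq, altEq]
  have hM3 := pvM_le labels
  have h0 := pvH0 labels
  have h1 := pvH1 labels
  have h2 := pvH2 labels
  by_cases c0 : pvM labels ≤ 0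
  · have hMv : pvM labels = 0 := by omega
    rcases h0.1 c0 with h | h
    · simp [h, hMv, pvNames]
    · simp [h, hMv, pvNames]
  · have hc0a : ¬ ∃ s ∈ labels, pvLow s = "pre-existing" := fun h => c0 (h0.2 (Or.inl h))
    have hc0b : ¬ ∃ s ∈ labels, pvLow s = "pre_existing" := fun h => c0 (h0.2 (Or.inr h))
    by_cases c1 : pvM labels ≤ 1
    · have hMv : pvM labels = 1 := by omega
      rcases h1.1 c1 with h | h | h
      · omega
      · simp [hc0a, hc0b, h, hMv, pvNames]
      · simp [hc0a, hc0b, h, hMv, pvNames]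
    · have hc1a : ¬ ∃ s ∈ labels, pvLow s = "infra" := fun h => c1 (h1.2 (Or.inr (Or.inl h)))
      have hc1b : ¬ ∃ s ∈ labels, pvLow s = "infrastructure" := fun h => c1 (h1.2 (Or.inr (Or.inr h)))
      by_cases c2 : pvM labels ≤ 2
      · have hMv : pvM labels = 2 := by omega
        rcases h2.1 c2 with h | h | h | h
        · omega
        · simp [hc0a, hc0b, hc1a, hc1b, h, hMv, pvNames]
        · simp [hc0a, hc0b, hc1a, hc1b, h, hMv, pvNames]
        · simp [hc0a, hc0b, hc1a, hc1b, h, hMv, pvNames]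
      · have hMv : pvM labels = 3 := by omega
        have hc2a : ¬ ∃ s ∈ labels, pvLow s = "feature-request" := fun h => c2 (h2.2 (Or.inr (Or.inl h)))
        have hc2b : ¬ ∃ s ∈ labels, pvLow s = "feature_request" := fun h => c2 (h2.2 (Or.inr (Or.inr (Or.inl h))))
        have hc2c : ¬ ∃ s ∈ labels, pvLow s = "enhancement" := fun h => c2 (h2.2 (Or.inr (Or.inr (Or.inr h))))
        simp [hc0a, hc0b, hc1a, hc1b, hc2a, hc2b, hc2c, hMv, pvNames]
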